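-- pv_equiv track=rewrite | github.com/GaboAzorin/Loto | methods.py | get_combination_index
-- ===== SOURCE A (Python) =====
-- import math
--
-- def get_combination_index(nums):
--     nums = sorted(nums)  # Aseguramos que los números están ordenados
--     indice = 0
--
--     def combinaciones(n, r):
--         return math.comb(n, r)
--
--     for i, num in enumerate(nums):
--         for prev_num in range(nums[i - 1] + 1 if i != 0 else 1, num):
--             indice += combinaciones(41 - prev_num, 6 - i - 1)
--
--     return indice + 1  # +1 para que comience desde 1 en vez de 0
-- ===== SOURCE B (Python) =====
-- import math
--
-- def get_combination_index(nums):
--     total, i, prev = 1, 0, 0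
--     for num in sorted(nums):
--         lo = prev + 1
--         if lo < num:
--             total += math.comb(42 - lo, 6 - i) - math.comb(42 - num, 6 - i)
--         i += 1
--         prev = num
--     return total
-- ===== Notes on version B (the rewrite author's own statement) =====
-- stated objective: simpler
-- what changed: The inner loop that sums comb(41-p, 5-i) over each gap is replaced by the hockey-stick closed form comb(42-lo, 6-i) - comb(42-num, 6-i), and the outer indexed traversal with lookback nums[i-1] becomes a recursion over the sorted list carrying the previous element.
import Mathlib
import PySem

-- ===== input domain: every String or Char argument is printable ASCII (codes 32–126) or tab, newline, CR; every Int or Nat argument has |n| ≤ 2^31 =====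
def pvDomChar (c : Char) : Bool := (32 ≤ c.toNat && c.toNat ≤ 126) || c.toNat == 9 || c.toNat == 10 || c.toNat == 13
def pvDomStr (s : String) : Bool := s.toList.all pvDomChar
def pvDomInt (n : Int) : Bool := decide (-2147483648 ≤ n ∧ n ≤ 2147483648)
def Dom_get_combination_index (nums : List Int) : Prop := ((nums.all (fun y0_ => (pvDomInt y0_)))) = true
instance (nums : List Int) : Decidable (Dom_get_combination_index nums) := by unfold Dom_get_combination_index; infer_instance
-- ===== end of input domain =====

-- B replaces A's inner range-sum over each gap with the hockey-stick closed form
-- comb(42-lo, 6-i) - comb(42-num, 6-i), in a single pass over the sorted list that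
-- carries the previous element, instead of A's indexed lookback with an inner loop.

-- math.comb(n, r): Python raises ValueError for n < 0 or r < 0 (excluded by Pre_);
-- there this port returns 0, and it returns 0 for r > n ≥ 0 exactly as Python does.
def mathComb (n r : Int) : Int := if n < 0 ∨ r < 0 then 0 else (Nat.choose n.toNat r.toNat : Int)

-- ===== PORT A =====
def get_combination_index (nums : List Int) : Int :=
  let s := PySem.List.sorted nums (fun x => x) false
  let indice : Int := 0
  let indice := (PySem.List.enumerate s).foldl
    (fun indice iv =>
      (PySem.List.pyRange (if iv.1 ≠ 0 then PySem.List.pyGetD s (iv.1 - 1) 0 + 1 else 1) iv.2 1).foldl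
        (fun indice prev_num => indice + mathComb (41 - prev_num) (6 - iv.1 - 1)) indice) indice
  indice + 1

-- ===== PORT B =====
-- state (total, i, prev)
def get_combination_index_alt (nums : List Int) : Int :=
  ((PySem.List.sorted nums (fun x => x) false).foldl
    (fun (st : Int × Int × Int) num =>
      let lo := st.2.2 + 1
      let total := if lo < num then
          st.1 + (mathComb (42 - lo) (6 - st.2.1) - mathComb (42 - num) (6 - st.2.1))
        else st.1
      (total, st.2.1 + 1, num)) (1, 0, 0)).1

-- ===== PRECONDITION & SPEC =====
-- Pre_ is exactly A's non-raising domain: in the sorted list, every "gap" (a position whose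
-- value exceeds the previous value + 1, resp. exceeds 1 at position 0) must sit at position ≤ 5
-- with value ≤ 42 — otherwise math.comb gets a negative argument and A raises ValueError.
def Pre_get_combination_index (nums : List Int) : Prop :=
  ∀ i < (PySem.List.sorted nums (fun x => x) false).length,
    (if i = 0 then 1 else (PySem.List.sorted nums (fun x => x) false).getD (i - 1) 0 + 1) <
        (PySem.List.sorted nums (fun x => x) false).getD i 0 →
      i ≤ 5 ∧ (PySem.List.sorted nums (fun x => x) false).getD i 0 ≤ 42
instance (nums : List Int) : Decidable (Pre_get_combination_index nums) := by
  unfold Pre_get_combination_index; infer_instance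

def pvWitness_get_combination_index : List Int := [1, 5, 10, 20, 30, 40]

def Spec_get_combination_index (nums : List Int) (out : Int) : Prop := out = get_combination_index_alt nums
instance (nums : List Int) (out : Int) : Decidable (Spec_get_combination_index nums out) := by unfold Spec_get_combination_index; infer_instance

-- ===== CLAIM (what is proved, stated in full; the proofs are below) =====
def Claim_equal_get_combination_index : Prop := ∀ (nums : List Int), Dom_get_combination_index nums → Pre_get_combination_index nums → Spec_get_combination_index nums (get_combination_index nums)

-- ===== LEMMAS AND PROOFS =====

-- Pascal's rule for the ported math.comb, in the nonnegative region.
theorem mathComb_pascal (n k : Int) (hn : 0 ≤ n) (hk : 0 ≤ k) :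
    mathComb (n + 1) (k + 1) = mathComb n k + mathComb n (k + 1) := by
  unfold mathComb
  rw [if_neg (by omega), if_neg (by omega), if_neg (by omega)]
  have h1 : (n + 1).toNat = n.toNat + 1 := by omega
  have h2 : (k + 1).toNat = k.toNat + 1 := by omega
  rw [h1, h2, Nat.choose_succ_succ]
  push_cast
  ring

-- Hockey-stick telescoping of A's inner range sum, for num = lo + n.
theorem gapSumAux (k : Int) (hk : 0 ≤ k) : ∀ (n : Nat) (lo num : Int), num ≤ 42 → num - lo = n →
    ((PySem.List.pyRange lo num 1).map (fun p => mathComb (41 - p) k)).sum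
      = mathComb (42 - lo) (k + 1) - mathComb (42 - num) (k + 1) := by
  intro n
  induction n with
  | zero =>
    intro lo num h42 hn
    have : num = lo := by omega
    subst this
    rw [PySem.List.pyRange_one_eq_nil (le_refl _)]
    simp
  | succ n ih =>
    intro lo num h42 hn
    rw [PySem.List.pyRange_one_cons (by omega), List.map_cons, List.sum_cons,
      ih (lo + 1) num h42 (by omega)]
    have h42lo : 42 - lo = (41 - lo) + 1 := by ring
    have hpas : mathComb (42 - lo) (k + 1) = mathComb (41 - lo) k + mathComb (41 - lo) (k + 1) := by
      rw [h42lo]; exact mathComb_pascal (41 - lo) k (by omega) hk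
    have h41 : 42 - (lo + 1) = 41 - lo := by ring
    rw [h41, hpas]
    ring

-- The per-gap equality: A's inner sum equals the guarded closed form.
theorem gapSum (lo num k : Int) (hnum : num ≤ 42) (hk : 0 ≤ k) :
    ((PySem.List.pyRange lo num 1).map (fun p => mathComb (41 - p) k)).sum
      = if lo < num then mathComb (42 - lo) (k + 1) - mathComb (42 - num) (k + 1) else 0 := by
  by_cases h : lo < num
  · rw [if_pos h]
    exact gapSumAux k hk (num - lo).toNat lo num hnum (by omega)
  · rw [if_neg h, PySem.List.pyRange_one_eq_nil (by omega)]
    simp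

-- Shape of an element of PySem.List.enumerate: a nonnegative in-range index paired
-- with the element of the list at that index.
theorem mem_enumerate_facts {α : Type} [Inhabited α] (xs : List α) :
    ∀ (st : Int) (p : Int × α), p ∈ PySem.List.enumerate xs st →
      st ≤ p.1 ∧ p.1 < st + xs.length ∧ p.2 = xs.getD (p.1 - st).toNat default := by
  induction xs with
  | nil => intro st p hp; simp [PySem.List.enumerate] at hp
  | cons x xs ih =>
    intro st p hp
    rw [PySem.List.enumerate_cons] at hp
    rcases List.mem_cons.mp hp with h | h
    · subst h
      simp
    · obtain ⟨h1, h2, h3⟩ := ih (st + 1) p h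
      refine ⟨by omega, by simp [List.length_cons]; omega, ?_⟩
      rw [h3]
      have : (p.1 - st).toNat = (p.1 - (st + 1)).toNat + 1 := by omega
      simp [this]

-- A loop 'acc := inner-sum added to acc' is the sum of the per-element inner sums.
theorem foldl_plus {α : Type} (l : List α) (g : α → Int) (init : Int) :
    l.foldl (fun acc x => acc + g x) init = init + (l.map g).sum := by
  induction l generalizing init with
  | nil => simp
  | cons x xs ih => simp [List.foldl_cons, ih]; ring

-- Proof-side recursive view of B's loop: what B adds from suffix s at index i with carried prev.
def altRank (s : List Int) (i prev : Int) : Int :=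
  match s with
  | [] => 0
  | num :: rest =>
    let lo := prev + 1
    let gap := if lo < num then mathComb (42 - lo) (6 - i) - mathComb (42 - num) (6 - i) else 0
    gap + altRank rest (i + 1) num

-- B's foldl computes its initial total plus altRank of the remaining list.
theorem foldl_eq_altRank : ∀ (s : List Int) (t i prev : Int),
    (s.foldl (fun (st : Int × Int × Int) num =>
      let lo := st.2.2 + 1
      let total := if lo < num then
          st.1 + (mathComb (42 - lo) (6 - st.2.1) - mathComb (42 - num) (6 - st.2.1))
        else st.1
      (total, st.2.1 + 1, num)) (t, i, prev)).1 = t + altRank s i prev := by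
  intro s
  induction s with
  | nil => intro t i prev; simp [altRank]
  | cons num rest ih =>
    intro t i prev
    simp only [List.foldl_cons, altRank, ih]
    split_ifs <;> ring

-- B's loop over a suffix of s, starting at index j with carried prev, equals the
-- enumerate-indexed sum of the guarded closed forms with A's pyGetD lookback into s.
theorem altRank_eq_sum (s : List Int) :
    ∀ (t : List Int) (j prev : Int), 0 ≤ j → s.drop j.toNat = t →
      (j = 0 → prev = 0) → (j ≠ 0 → PySem.List.pyGetD s (j - 1) 0 = prev) →
      altRank t j prev
        = ((PySem.List.enumerate t j).map (fun iv =>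
            if (if iv.1 ≠ 0 then PySem.List.pyGetD s (iv.1 - 1) 0 + 1 else 1) < iv.2 then
              mathComb (42 - (if iv.1 ≠ 0 then PySem.List.pyGetD s (iv.1 - 1) 0 + 1 else 1)) (6 - iv.1)
                - mathComb (42 - iv.2) (6 - iv.1)
            else 0)).sum := by
  intro t
  induction t with
  | nil => intro j prev _ _ _ _; simp [altRank, PySem.List.enumerate_nil]
  | cons num rest ih =>
    intro j prev hj hdrop h0 hne
    have hlo : (if j ≠ 0 then PySem.List.pyGetD s (j - 1) 0 + 1 else 1) = prev + 1 := by
      rcases eq_or_ne j 0 with h | h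
      · rw [if_neg (by simp [h]), h0 h]; ring
      · rw [if_pos h, hne h]
    have hget : PySem.List.pyGetD s j 0 = num := by
      rw [PySem.List.pyGetD_of_nonneg s 0 hj]
      have hg : s[j.toNat]? = some num := by
        have : (s.drop j.toNat)[0]? = some num := by rw [hdrop]; rfl
        simpa using this
      simp [List.getD, hg]
    have hdrop' : s.drop (j + 1).toNat = rest := by
      have h1 : (j + 1).toNat = j.toNat + 1 := by omega
      rw [h1, ← List.drop_drop, hdrop]
      rfl
    simp only [altRank, PySem.List.enumerate_cons, List.map_cons, List.sum_cons]
    rw [ih (j + 1) num (by omega) hdrop' (by omega) (fun _ => by simpa using hget), hlo]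

-- ===== VERDICT (by name: the statement is the Claim_ definition above) =====
theorem get_combination_index_spec : Claim_equal_get_combination_index := by
  intro nums _hdom hgap
  unfold Pre_get_combination_index at hgap
  unfold Spec_get_combination_index get_combination_index get_combination_index_alt
  simp only []
  obtain ⟨s, hs⟩ : ∃ s, PySem.List.sorted nums (fun x => x) false = s := ⟨_, rfl⟩
  rw [hs] at hgap ⊢
  -- A's nested foldl becomes the sum of the inner range sums
  have hA : (fun (indice : Int) (iv : Int × Int) =>
      (PySem.List.pyRange (if iv.1 ≠ 0 then PySem.List.pyGetD s (iv.1 - 1) 0 + 1 else 1) iv.2 1).foldl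
        (fun indice prev_num => indice + mathComb (41 - prev_num) (6 - iv.1 - 1)) indice)
      = fun (indice : Int) (iv : Int × Int) => indice +
        (((PySem.List.pyRange (if iv.1 ≠ 0 then PySem.List.pyGetD s (iv.1 - 1) 0 + 1 else 1) iv.2 1).map
          (fun p => mathComb (41 - p) (6 - iv.1 - 1))).sum) := by
    funext indice iv
    exact foldl_plus _ _ _
  rw [hA, foldl_plus]
  -- pointwise, each inner sum is the guarded hockey-stick closed form
  have hpt : ∀ iv ∈ PySem.List.enumerate s 0,
      ((PySem.List.pyRange (if iv.1 ≠ 0 then PySem.List.pyGetD s (iv.1 - 1) 0 + 1 else 1) iv.2 1).map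
          (fun p => mathComb (41 - p) (6 - iv.1 - 1))).sum
        = (if (if iv.1 ≠ 0 then PySem.List.pyGetD s (iv.1 - 1) 0 + 1 else 1) < iv.2 then
            mathComb (42 - (if iv.1 ≠ 0 then PySem.List.pyGetD s (iv.1 - 1) 0 + 1 else 1)) (6 - iv.1)
              - mathComb (42 - iv.2) (6 - iv.1)
          else 0) := by
    intro iv hiv
    obtain ⟨h0, hlt, hv⟩ := mem_enumerate_facts s 0 iv hiv
    set lo := (if iv.1 ≠ 0 then PySem.List.pyGetD s (iv.1 - 1) 0 + 1 else 1) with hlo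
    by_cases h : lo < iv.2
    · -- a gap: Pre_ bounds its index and value
      have hvd : iv.2 = s.getD iv.1.toNat 0 := by simpa using hv
      have hcond : (if iv.1.toNat = 0 then 1 else s.getD (iv.1.toNat - 1) 0 + 1) < s.getD iv.1.toNat 0 := by
        rcases eq_or_ne iv.1 0 with h1 | h1
        · rw [if_pos (by omega)]
          rw [hlo, if_neg (by simp [h1]), ← hvd] at *
          omega
        · rw [if_neg (by omega)]
          have hnn : (0:Int) ≤ iv.1 - 1 := by omega
          have : PySem.List.pyGetD s (iv.1 - 1) 0 = s.getD (iv.1 - 1).toNat 0 :=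
            PySem.List.pyGetD_of_nonneg s 0 hnn
          rw [hlo, if_pos h1, this] at h
          have htn : (iv.1 - 1).toNat = iv.1.toNat - 1 := by omega
          rw [htn] at h
          omega
      obtain ⟨hi5, h42⟩ := hgap iv.1.toNat (by omega) hcond
      rw [← hvd] at h42
      have hk : (0:Int) ≤ 6 - iv.1 - 1 := by omega
      rw [gapSum lo iv.2 (6 - iv.1 - 1) h42 hk]
      have : 6 - iv.1 - 1 + 1 = 6 - iv.1 := by ring
      rw [this]
    · rw [if_neg h, PySem.List.pyRange_one_eq_nil (by omega)]
      simp
  rw [List.map_congr_left hpt, foldl_eq_altRank,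
    altRank_eq_sum s s 0 0 (le_refl _) (by rfl) (fun _ => rfl) (fun h => absurd rfl h)]
  ring
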